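-- pv_equiv track=rewrite | github.com/sohamb23/Sleek | smartMenuRecognition.py | vertexArrCreator
-- ===== SOURCE A (Python) =====
-- def vertexArrCreator(detectedVertices):
--     allVertices = []
--     for boxVertices in detectedVertices:
--         actualVertices = []
--         currStr = ""
--         for vertexPair in boxVertices:
--             vertexPairArr = []
--             for i in range(1,len(vertexPair)):
--                 if(vertexPair[i] != "," and vertexPair[i] != ")"):
--                     currStr += vertexPair[i]
--                 else:
--                     vertexPairArr.append(int(currStr))
--                     currStr = ""
--             actualVertices.append(vertexPairArr)
--         allVertices.append(actualVertices)
--     return allVertices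
-- ===== SOURCE B (Python) =====
-- def _nums(elems):
--     """Parse the integers encoded in elems: everything up to the first ',' or ')'
--     element is one number, the rest of the list is parsed recursively."""
--     for k, e in enumerate(elems):
--         if e in (",", ")"):
--             return [int("".join(elems[:k]))] + _nums(elems[k + 1:])
--     return []
--
--
-- def vertexArrCreator(detectedVertices):
--     return [[_nums(vertexPair[1:]) for vertexPair in boxVertices]
--             for boxVertices in detectedVertices]
-- ===== Notes on version B (the rewrite author's own statement) =====
-- stated objective: simpler
-- what changed: A's char-by-char accumulate-and-emit-at-delimiter state machine with per-box mutable state is replaced by two comprehensions over a recursive per-entry parser (find the next ','/')' delimiter, int() the prefix, recurse on the rest); Pre_ excludes inputs where an entry of a box leaves leftover text after its last delimiter and a later entry of the same box contains a delimiter, because A's un-reset currStr accidentally carries that leftover into the later entry's first number while the per-entry B raises ValueError or parses independently.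
-- outside the precondition, e.g. on vertexArrCreator([[['(', '1'], ['(', ',', '2', ')']]]): A returns [[[], [1, 2]]], B raises ValueError
import Mathlib
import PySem

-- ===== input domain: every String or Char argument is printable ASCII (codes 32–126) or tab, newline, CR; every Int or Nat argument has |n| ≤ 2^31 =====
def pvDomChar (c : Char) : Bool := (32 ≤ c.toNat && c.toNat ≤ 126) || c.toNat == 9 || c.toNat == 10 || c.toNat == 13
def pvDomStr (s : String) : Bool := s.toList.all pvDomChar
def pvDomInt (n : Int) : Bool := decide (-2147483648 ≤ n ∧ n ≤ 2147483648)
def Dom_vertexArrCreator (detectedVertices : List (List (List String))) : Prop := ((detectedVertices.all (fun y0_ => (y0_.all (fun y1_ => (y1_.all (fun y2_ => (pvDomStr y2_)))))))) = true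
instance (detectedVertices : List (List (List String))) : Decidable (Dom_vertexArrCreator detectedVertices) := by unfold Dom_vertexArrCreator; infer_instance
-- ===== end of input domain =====

-- B replaces A's accumulate-and-emit-at-delimiter state machine (with per-box mutable currStr)
-- by two comprehensions over a recursive per-entry parser: find the next "," / ")" element,
-- int() the joined prefix, recurse on the rest — objective: simpler.

-- ===== PORT A =====
-- currStr is kept as its character list (Python str += x appends x's characters on the right);
-- int(currStr) is PySem.Int.ofChars?; its ValueError case (none) is excluded by Pre_, .getD 0 there.
-- range(1, len(vertexPair)) visits exactly the elements of vertexPair after the first: the tail list.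
def vertexArrCreator (detectedVertices : List (List (List String))) : List (List (List Int)) :=
  detectedVertices.map (fun boxVertices =>
    (boxVertices.foldl
      (fun (st : List Char × List (List Int)) vertexPair =>
        let r := (vertexPair.drop 1).foldl
          (fun (st2 : List Char × List Int) x =>
            if x ≠ "," ∧ x ≠ ")" then (st2.1 ++ x.toList, st2.2)
            else ([], st2.2 ++ [(PySem.Int.ofChars? st2.1).getD 0]))
          (st.1, [])
        (r.1, st.2 ++ [r.2]))
      ([], [])).2)

-- ===== PORT B =====
-- _nums of Source B: the scan for the first delimiter element is List.findIdx?; elems[:k] is take k,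
-- "".join is flattening the elements' character lists, int(...) is PySem.Int.ofChars? (ValueError
-- = none, excluded by Pre_, .getD 0 there); elems[k+1:] is drop (k+1).
def numsB (elems : List String) : List Int :=
  match h : elems.findIdx? (fun e => e == "," || e == ")") with
  | none => []
  | some k =>
    (PySem.Int.ofChars? (((elems.take k).map String.toList).flatten)).getD 0
      :: numsB (elems.drop (k + 1))
termination_by elems.length
decreasing_by
  obtain ⟨hlt, -⟩ := List.findIdx?_eq_some_iff_getElem.mp h
  simp only [List.length_drop]
  omega

def vertexArrCreator_alt (detectedVertices : List (List (List String))) : List (List (List Int)) :=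
  detectedVertices.map (fun boxVertices =>
    boxVertices.map (fun vertexPair => numsB (vertexPair.drop 1)))

-- ===== PRECONDITION & SPEC =====
-- pvTok l: the tokens of an entry's tail — the maximal runs of elements between "," / ")"
-- delimiter elements, each joined into one character string (always ends with the text after
-- the last delimiter, possibly empty).
def pvTok (l : List String) : List (List Char) :=
  (l.splitOnP (fun x => x == "," || x == ")")).map (fun p => (p.map String.toList).flatten)

-- Pre_ excludes (a) inputs where some entry of a box has leftover text after its last delimiter
-- and a LATER entry of the same box contains a delimiter — A's currStr, never reset between
-- entries, accidentally carries that text into the later entry's first number, while the natural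
-- per-entry B raises ValueError (int('')) or parses the entries independently — and (b) inputs
-- where a token before a delimiter is not a valid int literal, on which Python A raises ValueError.
def Pre_vertexArrCreator (detectedVertices : List (List (List String))) : Prop :=
  ∀ box ∈ detectedVertices,
    (box.Pairwise (fun v w => (pvTok (v.drop 1)).getLastD [] ≠ [] →
      ((w.drop 1).all (fun x => !(x == "," || x == ")"))) = true)) ∧
    (∀ vp ∈ box, ∀ t ∈ (pvTok (vp.drop 1)).dropLast, (PySem.Int.ofChars? t).isSome = true)
instance (detectedVertices : List (List (List String))) : Decidable (Pre_vertexArrCreator detectedVertices) := by unfold Pre_vertexArrCreator; infer_instance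
def pvWitness_vertexArrCreator : List (List (List String)) :=
  [[["(", "1", ",", "2", ")"], ["(", "30", ",", "-4", ")"]], [["(", "5", ",", "6", ")"]]]
def Spec_vertexArrCreator (detectedVertices : List (List (List String))) (out : List (List (List Int))) : Prop := out = vertexArrCreator_alt detectedVertices
instance (detectedVertices : List (List (List String))) (out : List (List (List Int))) : Decidable (Spec_vertexArrCreator detectedVertices out) := by unfold Spec_vertexArrCreator; infer_instance

-- ===== CLAIM (what is proved, stated in full; the proofs are below) =====
def Claim_equal_vertexArrCreator : Prop := ∀ (detectedVertices : List (List (List String))), Dom_vertexArrCreator detectedVertices → Pre_vertexArrCreator detectedVertices → Spec_vertexArrCreator detectedVertices (vertexArrCreator detectedVertices)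

-- ===== LEMMAS AND PROOFS =====

lemma pvTok_nil : pvTok [] = [[]] := by
  simp [pvTok, List.splitOnP_nil]

lemma pvTok_cons_delim (x : String) (t : List String) (hx : x = "," ∨ x = ")") :
    pvTok (x :: t) = [] :: pvTok t := by
  have : (x == "," || x == ")") = true := by
    rcases hx with h | h <;> simp [h]
  simp [pvTok, List.splitOnP_cons, this]

lemma pvTok_cons_of_not_delim (x : String) (t : List String) (hx : ¬(x = "," ∨ x = ")")) :
    pvTok (x :: t) = (pvTok t).modifyHead (x.toList ++ ·) := by
  have hb : (x == "," || x == ")") = false := by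
    simp only [Bool.or_eq_false_iff, beq_eq_false_iff_ne, ne_eq]
    exact ⟨fun h => hx (Or.inl h), fun h => hx (Or.inr h)⟩
  simp only [pvTok, List.splitOnP_cons, hb, Bool.false_eq_true, if_false]
  cases h : t.splitOnP (fun x => x == "," || x == ")") with
  | nil => exact absurd h (List.splitOnP_ne_nil _ t)
  | cons p ps => simp

lemma pvTok_ne_nil (l : List String) : pvTok l ≠ [] := by
  simp only [pvTok, ne_eq, List.map_eq_nil_iff]
  exact List.splitOnP_ne_nil _ l

-- A's inner loop over one entry, started with leftover cur, tokenises the entry's tail with cur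
-- prefixed to the first token: it emits int() of every token before the last one and leaves the
-- last token as the new leftover.
lemma inner_loop_eq (l : List String) : ∀ (cur : List Char) (acc : List Int),
    l.foldl
      (fun (st2 : List Char × List Int) x =>
        if x ≠ "," ∧ x ≠ ")" then (st2.1 ++ x.toList, st2.2)
        else ([], st2.2 ++ [(PySem.Int.ofChars? st2.1).getD 0]))
      (cur, acc) =
    (((pvTok l).modifyHead (cur ++ ·)).getLastD [],
     acc ++ ((pvTok l).modifyHead (cur ++ ·)).dropLast.map
       (fun p => (PySem.Int.ofChars? p).getD 0)) := by
  induction l with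
  | nil => intro cur acc; simp [pvTok_nil]
  | cons x t ih =>
    intro cur acc
    by_cases hx : x ≠ "," ∧ x ≠ ")"
    · have hnd : ¬(x = "," ∨ x = ")") := by
        rintro (h | h)
        · exact hx.1 h
        · exact hx.2 h
      rw [List.foldl_cons]
      simp only [if_pos hx]
      rw [ih (cur ++ x.toList) acc, pvTok_cons_of_not_delim x t hnd]
      cases h : pvTok t with
      | nil => exact absurd h (pvTok_ne_nil t)
      | cons p ps => simp [List.append_assoc]
    · have hd : x = "," ∨ x = ")" := by tauto
      rw [List.foldl_cons]
      simp only [if_neg hx]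
      rw [ih [] (acc ++ [(PySem.Int.ofChars? cur).getD 0]), pvTok_cons_delim x t hd]
      cases h : pvTok t with
      | nil => exact absurd h (pvTok_ne_nil t)
      | cons p ps => simp

-- no delimiter element in l ⇒ one single token
lemma pvTok_of_no_delim (l : List String) (h : ∀ x ∈ l, ¬((x == "," || x == ")") = true)) :
    pvTok l = [(l.map String.toList).flatten] := by
  simp [pvTok, List.splitOnP_eq_single _ _ h]

-- first delimiter at k splits off the first token
lemma pvTok_split (l : List String) (k : Nat)
    (hk : l.findIdx? (fun e => e == "," || e == ")") = some k) :
    pvTok l = ((l.take k).map String.toList).flatten :: pvTok (l.drop (k + 1)) := by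
  obtain ⟨hlt, hpk, hlt'⟩ := List.findIdx?_eq_some_iff_getElem.mp hk
  have hdecomp : l = l.take k ++ l[k] :: l.drop (k + 1) := by
    conv_lhs => rw [← List.take_append_drop k l]
    rw [List.drop_eq_getElem_cons hlt]
  have hfree : ∀ x ∈ l.take k, ¬((x == "," || x == ")") = true) := by
    intro x hxmem
    rw [List.mem_take_iff_getElem] at hxmem
    obtain ⟨j, hj, rfl⟩ := hxmem
    have := hlt' j (by omega)
    simpa using this
  conv_lhs => rw [pvTok, hdecomp]
  rw [List.splitOnP_first _ _ hfree l[k] hpk]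
  simp [pvTok]

-- B's per-entry parser computes int() of every token before the last one
lemma numsB_eq (l : List String) :
    numsB l = (pvTok l).dropLast.map (fun p => (PySem.Int.ofChars? p).getD 0) := by
  fun_induction numsB l with
  | case1 l h =>
    have hfree := List.findIdx?_eq_none_iff.mp h
    rw [pvTok_of_no_delim l (by intro x hx; simpa using hfree x hx)]
    simp
  | case2 l k h ih =>
    rw [pvTok_split l k h]
    cases h2 : pvTok (l.drop (k + 1)) with
    | nil => exact absurd h2 (pvTok_ne_nil _)
    | cons p ps =>
      rw [h2] at ih
      simp [ih]

-- A's fold over one box: while every processed non-final entry leaves an empty trailing token,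
-- the leftover stays empty and each entry contributes exactly its own tokens-before-last.
-- an entry whose tail has no delimiter element produces one single token: A's inner loop only
-- extends the leftover and emits nothing, whatever the leftover is
lemma pvTok_single_of_free (vp : List String)
    (hf : ((vp.drop 1).all (fun x => !(x == "," || x == ")"))) = true) :
    pvTok (vp.drop 1) = [((vp.drop 1).map String.toList).flatten] := by
  apply pvTok_of_no_delim
  intro x hx
  have := List.all_eq_true.mp hf x hx
  simpa using this

-- once the remaining entries of a box are all delimiter-free, A's fold appends [] for each of
-- them, whatever leftover it carries
lemma suffix_fold_eq (t : List (List String))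
    (hfree : ∀ w ∈ t, ((w.drop 1).all (fun x => !(x == "," || x == ")"))) = true) :
    ∀ (cur : List Char) (acc : List (List Int)),
    (t.foldl
      (fun (st : List Char × List (List Int)) vertexPair =>
        (((vertexPair.drop 1).foldl
          (fun (st2 : List Char × List Int) x =>
            if x ≠ "," ∧ x ≠ ")" then (st2.1 ++ x.toList, st2.2)
            else ([], st2.2 ++ [(PySem.Int.ofChars? st2.1).getD 0]))
          (st.1, [])).1,
         st.2 ++ [((vertexPair.drop 1).foldl
          (fun (st2 : List Char × List Int) x =>
            if x ≠ "," ∧ x ≠ ")" then (st2.1 ++ x.toList, st2.2)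
            else ([], st2.2 ++ [(PySem.Int.ofChars? st2.1).getD 0]))
          (st.1, [])).2]))
      (cur, acc)).2 =
    acc ++ t.map (fun _ => []) := by
  induction t with
  | nil => intro cur acc; simp
  | cons w u ih =>
    intro cur acc
    rw [List.foldl_cons]
    simp only [inner_loop_eq (w.drop 1) cur []]
    rw [pvTok_single_of_free w (hfree w (List.mem_cons_self))]
    simp only [List.modifyHead_cons, List.dropLast_singleton]
    rw [ih (fun x hx => hfree x (List.mem_cons_of_mem w hx))]
    simp

-- A's fold over one box: as long as every processed entry leaves an empty trailing token the
-- leftover stays empty and each entry contributes exactly its own tokens-before-last; from the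
-- first entry with a nonempty trailing token on, Pre_'s Pairwise condition makes every later
-- entry delimiter-free, so both that fold tail and B contribute [] per remaining entry.
lemma box_fold_eq (box : List (List String))
    (htr : box.Pairwise (fun v w => (pvTok (v.drop 1)).getLastD [] ≠ [] →
      ((w.drop 1).all (fun x => !(x == "," || x == ")"))) = true)) :
    ∀ (acc : List (List Int)),
    (box.foldl
      (fun (st : List Char × List (List Int)) vertexPair =>
        (((vertexPair.drop 1).foldl
          (fun (st2 : List Char × List Int) x =>
            if x ≠ "," ∧ x ≠ ")" then (st2.1 ++ x.toList, st2.2)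
            else ([], st2.2 ++ [(PySem.Int.ofChars? st2.1).getD 0]))
          (st.1, [])).1,
         st.2 ++ [((vertexPair.drop 1).foldl
          (fun (st2 : List Char × List Int) x =>
            if x ≠ "," ∧ x ≠ ")" then (st2.1 ++ x.toList, st2.2)
            else ([], st2.2 ++ [(PySem.Int.ofChars? st2.1).getD 0]))
          (st.1, [])).2]))
      ([], acc)).2 =
    acc ++ box.map (fun vp =>
      (pvTok (vp.drop 1)).dropLast.map (fun p => (PySem.Int.ofChars? p).getD 0)) := by
  induction box with
  | nil => intro acc; simp
  | cons v t ih =>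
    intro acc
    obtain ⟨hv, ht⟩ := List.pairwise_cons.mp htr
    rw [List.foldl_cons]
    simp only [inner_loop_eq (v.drop 1) [] []]
    have hmod : (pvTok (v.drop 1)).modifyHead (([] : List Char) ++ ·) = pvTok (v.drop 1) := by
      cases h : pvTok (v.drop 1) <;> simp
    rw [hmod]
    by_cases htrail : (pvTok (v.drop 1)).getLastD [] = []
    · rw [htrail]
      simp only [List.nil_append]
      rw [ih ht (acc ++ [(pvTok (v.drop 1)).dropLast.map (fun p => (PySem.Int.ofChars? p).getD 0)])]
      simp
    · have hfree : ∀ w ∈ t, ((w.drop 1).all (fun x => !(x == "," || x == ")"))) = true :=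
        fun w hw => hv w hw htrail
      simp only [List.nil_append]
      rw [suffix_fold_eq t hfree _ (acc ++ [(pvTok (v.drop 1)).dropLast.map (fun p => (PySem.Int.ofChars? p).getD 0)])]
      have : t.map (fun vp =>
          (pvTok (vp.drop 1)).dropLast.map (fun p => (PySem.Int.ofChars? p).getD 0)) =
          t.map (fun _ => []) := by
        apply List.map_congr_left
        intro w hw
        rw [pvTok_single_of_free w (hfree w hw)]
        simp
      simp only [List.map_cons, this]
      rw [List.append_assoc, List.singleton_append]

-- ===== VERDICT (by name: the statement is the Claim_ definition above) =====
theorem vertexArrCreator_spec : Claim_equal_vertexArrCreator := by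
  intro dv _ hpre
  unfold Spec_vertexArrCreator vertexArrCreator vertexArrCreator_alt
  apply List.map_congr_left
  intro box hbox
  simp only [box_fold_eq box (hpre box hbox).1 [], List.nil_append]
  apply List.map_congr_left
  intro vp _
  exact (numsB_eq (vp.drop 1)).symm
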